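-- pv_equiv track=rewrite | github.com/Suineg-Darhnoel/Problem_Solving | house_bank.py | solution
-- ===== SOURCE A (Python) =====
-- def solution(K, A):
--     house_positions = []
--     empty_positions = []
--
--     # separate the locations of the houses and the empty spaces
--     for i, row in enumerate(A):
--         for j, elem in enumerate(row):
--             if elem == 1:
--                 house_positions.append((i, j))
--             else:
--                 empty_positions.append((i, j))
--
--     # function to compute the distance from one point to another
--     def distance(p_a, p_b):
--         dy = abs(p_a[0] - p_b[0])
--         dx = abs(p_a[1] - p_b[1])
--         return dx + dy
--
--     sol = []
--     for empty_pos in empty_positions: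
--         if all((distance(hp, empty_pos) <= K
--             for hp in house_positions)):
--             sol.append(empty_pos)
--     return sol
-- ===== SOURCE B (Python) =====
-- def solution(K, A):
--     # One pass over the grid: collect empty cells and maintain the extremes of
--     # the rotated coordinates u=i+j, v=i-j over house cells; then each empty
--     # cell is checked in O(1) (|di|+|dj| = max(|du|, |dv|)).
--     ext = None  # (min_u, max_u, min_v, max_v) over houses
--     empties = []
--     for i, row in enumerate(A):
--         for j, elem in enumerate(row):
--             if elem == 1:
--                 u, v = i + j, i - j
--                 if ext is None:
--                     ext = (u, u, v, v)
--                 else: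
--                     a, b, c, d = ext
--                     ext = (min(a, u), max(b, u), min(c, v), max(d, v))
--             else:
--                 empties.append((i, j))
--     if ext is None:
--         return empties
--     a, b, c, d = ext
--     return [(i, j) for (i, j) in empties
--             if i + j - a <= K and b - (i + j) <= K
--             and i - j - c <= K and d - (i - j) <= K]
-- ===== Notes on version B (the rewrite author's own statement) =====
-- stated objective: faster
-- what changed: Instead of scanning every house for every empty cell, B makes one pass over the grid maintaining the min/max of the rotated coordinates i+j and i-j over houses (Manhattan = Chebyshev after rotation), then checks each empty cell in O(1).
import Mathlib
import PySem

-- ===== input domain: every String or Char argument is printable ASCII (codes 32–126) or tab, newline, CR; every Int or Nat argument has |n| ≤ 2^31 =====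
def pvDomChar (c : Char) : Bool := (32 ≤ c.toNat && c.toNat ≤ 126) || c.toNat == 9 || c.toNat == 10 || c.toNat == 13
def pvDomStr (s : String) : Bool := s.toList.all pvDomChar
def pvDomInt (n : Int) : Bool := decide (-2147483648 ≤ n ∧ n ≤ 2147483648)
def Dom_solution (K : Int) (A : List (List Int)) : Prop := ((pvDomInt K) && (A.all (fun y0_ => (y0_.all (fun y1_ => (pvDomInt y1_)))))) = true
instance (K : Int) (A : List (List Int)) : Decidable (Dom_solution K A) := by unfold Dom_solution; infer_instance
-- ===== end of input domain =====

-- B replaces A's per-empty-cell scan over all houses by precomputed extremes of the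
-- rotated coordinates i+j and i-j over houses (Manhattan → Chebyshev), O(1) per cell.

-- ===== PORT A =====
def solution (K : Int) (A : List (List Int)) : List (Int × Int) :=
  -- separate houses and empty spaces, row-major
  let hes : List (Int × Int) × List (Int × Int) :=
    (PySem.List.enumerate A).foldl (fun acc p =>
      (PySem.List.enumerate p.2).foldl (fun acc q =>
        if q.2 == 1 then (acc.1 ++ [(p.1, q.1)], acc.2)
        else (acc.1, acc.2 ++ [(p.1, q.1)])) acc) ([], [])
  -- for each empty cell, check all houses (distance = |dy| + |dx|)
  hes.2.foldl (fun sol e =>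
    if hes.1.all (fun hp => decide (|hp.1 - e.1| + |hp.2 - e.2| ≤ K)) then sol ++ [e]
    else sol) []

-- ===== PORT B =====
-- B-side helper: update the running (min u, max u, min v, max v) with one house
def pvExtStep (o : Option (Int × Int × Int × Int)) (u v : Int) : Option (Int × Int × Int × Int) :=
  match o with
  | none => some (u, u, v, v)
  | some (a, b, c, d) => some (min a u, max b u, min c v, max d v)

def solution_alt (K : Int) (A : List (List Int)) : List (Int × Int) :=
  let st : Option (Int × Int × Int × Int) × List (Int × Int) :=
    (PySem.List.enumerate A).foldl (fun st p =>
      (PySem.List.enumerate p.2).foldl (fun st q =>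
        if q.2 == 1 then (pvExtStep st.1 (p.1 + q.1) (p.1 - q.1), st.2)
        else (st.1, st.2 ++ [(p.1, q.1)])) st) (none, [])
  match st.1 with
  | none => st.2
  | some (a, b, c, d) =>
      st.2.filter (fun e =>
        decide (e.1 + e.2 - a ≤ K) && decide (b - (e.1 + e.2) ≤ K) &&
        decide (e.1 - e.2 - c ≤ K) && decide (d - (e.1 - e.2) ≤ K))

-- ===== PRECONDITION & SPEC =====
def Spec_solution (K : Int) (A : List (List Int)) (out : List (Int × Int)) : Prop := out = solution_alt K A
instance (K : Int) (A : List (List Int)) (out : List (Int × Int)) : Decidable (Spec_solution K A out) := by unfold Spec_solution; infer_instance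

-- ===== CLAIM (what is proved, stated in full; the proofs are below) =====
def Claim_equal_solution : Prop := ∀ (K : Int) (A : List (List Int)), Dom_solution K A → Spec_solution K A (solution K A)

-- ===== LEMMAS AND PROOFS =====

-- extremes of the rotated coordinates over a list of houses
def pvExtOf (hs : List (Int × Int)) : Option (Int × Int × Int × Int) :=
  hs.foldl (fun o hp => pvExtStep o (hp.1 + hp.2) (hp.1 - hp.2)) none

-- B's O(1) per-cell check, as a function of the extremes
def pvCheck (K : Int) (e : Int × Int) (o : Option (Int × Int × Int × Int)) : Bool :=
  match o with
  | none => true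
  | some (a, b, c, d) =>
      decide (e.1 + e.2 - a ≤ K) && decide (b - (e.1 + e.2) ≤ K) &&
      decide (e.1 - e.2 - c ≤ K) && decide (d - (e.1 - e.2) ≤ K)

theorem pvCheck_extStep (K : Int) (e : Int × Int) (o : Option (Int × Int × Int × Int))
    (u v : Int) :
    pvCheck K e (pvExtStep o u v)
      = (pvCheck K e o && decide (|u - (e.1 + e.2)| ≤ K ∧ |v - (e.1 - e.2)| ≤ K)) := by
  rcases o with _ | ⟨a, b, c, d⟩ <;>
    · simp only [pvExtStep, pvCheck]
      rw [Bool.eq_iff_iff]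
      simp only [Bool.and_eq_true, decide_eq_true_eq, Int.abs_eq_natAbs, Bool.true_and]
      omega

theorem pvCheck_extOf_foldl (K : Int) (e : Int × Int) (hs : List (Int × Int))
    (o : Option (Int × Int × Int × Int)) :
    pvCheck K e (hs.foldl (fun o hp => pvExtStep o (hp.1 + hp.2) (hp.1 - hp.2)) o)
      = (pvCheck K e o && hs.all (fun hp => decide (|hp.1 - e.1| + |hp.2 - e.2| ≤ K))) := by
  induction hs generalizing o with
  | nil => simp
  | cons hp hs ih =>
      obtain ⟨hx, hy⟩ := hp
      obtain ⟨ex, ey⟩ := e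
      simp only [List.foldl_cons, List.all_cons, ih, pvCheck_extStep, ← Bool.and_assoc]
      congr 2
      rw [decide_eq_decide]
      simp only [Int.abs_eq_natAbs]
      omega

-- A's all-houses check equals B's check of the precomputed extremes
theorem pvCheck_extOf (K : Int) (e : Int × Int) (hs : List (Int × Int)) :
    hs.all (fun hp => decide (|hp.1 - e.1| + |hp.2 - e.2| ≤ K)) = pvCheck K e (pvExtOf hs) := by
  rw [pvExtOf, pvCheck_extOf_foldl]; simp [pvCheck]

-- one row: B's fold carries exactly (extremes of A's houses, A's empties)
theorem pvInner (i : Int) (qs : List (Int × Int)) (hs es : List (Int × Int)) :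
    qs.foldl (fun st q =>
        if q.2 == 1 then (pvExtStep st.1 (i + q.1) (i - q.1), st.2)
        else (st.1, st.2 ++ [(i, q.1)])) (pvExtOf hs, es)
      = (pvExtOf ((qs.foldl (fun acc q =>
            if q.2 == 1 then (acc.1 ++ [(i, q.1)], acc.2)
            else (acc.1, acc.2 ++ [(i, q.1)])) (hs, es)).1),
         (qs.foldl (fun acc q =>
            if q.2 == 1 then (acc.1 ++ [(i, q.1)], acc.2)
            else (acc.1, acc.2 ++ [(i, q.1)])) (hs, es)).2) := by
  induction qs generalizing hs es with
  | nil => simp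
  | cons q qs ih =>
      simp only [List.foldl_cons]
      by_cases h : q.2 == 1
      · simp only [h, if_pos, ← ih]
        congr 1
        simp [pvExtOf, List.foldl_append]
      · simp only [h, if_neg, Bool.false_eq_true, not_false_iff, ← ih]

-- whole grid: same statement for the nested fold over the enumerated rows
theorem pvOuter (rows : List (Int × List Int)) (hs es : List (Int × Int)) :
    rows.foldl (fun st p =>
        (PySem.List.enumerate p.2).foldl (fun st q =>
          if q.2 == 1 then (pvExtStep st.1 (p.1 + q.1) (p.1 - q.1), st.2)
          else (st.1, st.2 ++ [(p.1, q.1)])) st) (pvExtOf hs, es)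
      = (pvExtOf ((rows.foldl (fun acc p =>
            (PySem.List.enumerate p.2).foldl (fun acc q =>
              if q.2 == 1 then (acc.1 ++ [(p.1, q.1)], acc.2)
              else (acc.1, acc.2 ++ [(p.1, q.1)])) acc) (hs, es)).1),
         (rows.foldl (fun acc p =>
            (PySem.List.enumerate p.2).foldl (fun acc q =>
              if q.2 == 1 then (acc.1 ++ [(p.1, q.1)], acc.2)
              else (acc.1, acc.2 ++ [(p.1, q.1)])) acc) (hs, es)).2) := by
  induction rows generalizing hs es with
  | nil => simp
  | cons p rows ih =>
      simp only [List.foldl_cons]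
      rw [pvInner, ih]

-- pvOuter specialised to the empty initial accumulators (pvExtOf [] = none definitionally)
theorem pvOuter' (rows : List (Int × List Int)) :
    rows.foldl (fun st p =>
        (PySem.List.enumerate p.2).foldl (fun st q =>
          if q.2 == 1 then (pvExtStep st.1 (p.1 + q.1) (p.1 - q.1), st.2)
          else (st.1, st.2 ++ [(p.1, q.1)])) st)
      ((none : Option (Int × Int × Int × Int)), ([] : List (Int × Int)))
      = (pvExtOf ((rows.foldl (fun acc p =>
            (PySem.List.enumerate p.2).foldl (fun acc q =>
              if q.2 == 1 then (acc.1 ++ [(p.1, q.1)], acc.2)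
              else (acc.1, acc.2 ++ [(p.1, q.1)])) acc) ([], [])).1),
         (rows.foldl (fun acc p =>
            (PySem.List.enumerate p.2).foldl (fun acc q =>
              if q.2 == 1 then (acc.1 ++ [(p.1, q.1)], acc.2)
              else (acc.1, acc.2 ++ [(p.1, q.1)])) acc) ([], [])).2) :=
  pvOuter rows [] []

-- ===== VERDICT (by name: the statement is the Claim_ definition above) =====
theorem solution_spec : Claim_equal_solution := by
  intro K A _
  unfold Spec_solution solution solution_alt
  rw [pvOuter']
  rw [PySem.List.foldl_append_if_eq_filter]
  rw [List.filter_congr (fun e _ => pvCheck_extOf K e _)]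
  cases h : pvExtOf ((List.foldl _ ([], []) (PySem.List.enumerate A)).1) with
  | none => simp [pvCheck]
  | some v =>
      obtain ⟨a, b, c, d⟩ := v
      simp [pvCheck]
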